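-- pv_equiv track=rewrite | github.com/SSAFY-6-1-3/Algorithm | 0107/s_13038_junh.py | solut
-- ===== SOURCE A (Python) =====
-- def solut(n, li):
--     week_sum = sum(li)
--     answer = 0
--     if week_sum == 1:
--         return (n-1)*7 + 1
--
--     if n > week_sum:
--         answer = (n//week_sum - 1) * 7
--         n = n%week_sum + week_sum
--     answer_rest = 14
--
--     for start in range(7):
--         if not li[start]: continue
--         cnt = 0
--         for i in range(14):
--             day = (start+i)%7
--             if li[day]:
--                 cnt +=1
--                 if cnt == n:
--                     answer_rest = min(answer_rest, i+1)
--                     break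
--
--     return answer + answer_rest
-- ===== SOURCE B (Python) =====
-- def solut(n, li):
--     week_sum = sum(li)
--     if week_sum == 1:
--         return (n - 1) * 7 + 1
--     answer = 0
--     if n > week_sum:
--         answer = (n // week_sum - 1) * 7
--         n = n % week_sum + week_sum
--     # open-day indices over three weeks; a window starting on day s < 7 that
--     # contains n open days ends on the n-th open index at or after s
--     opens = [i for i in range(21) if li[i % 7]]
--     best = 14
--     if n >= 1:
--         for s, e in zip(opens, opens[n - 1:]):
--             if s < 7 and e - s <= 13:
--                 best = min(best, e - s + 1)
--     return answer + best
-- ===== Notes on version B (the rewrite author's own statement) =====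
-- stated objective: alternative
-- what changed: A's 7-start-by-14-day counting rescan is replaced by one precomputed list of open-day indices over three weeks and a single sliding-window pass (zip with its own n-1 shift) over that list; the week_sum reduction is kept.
import Mathlib
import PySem

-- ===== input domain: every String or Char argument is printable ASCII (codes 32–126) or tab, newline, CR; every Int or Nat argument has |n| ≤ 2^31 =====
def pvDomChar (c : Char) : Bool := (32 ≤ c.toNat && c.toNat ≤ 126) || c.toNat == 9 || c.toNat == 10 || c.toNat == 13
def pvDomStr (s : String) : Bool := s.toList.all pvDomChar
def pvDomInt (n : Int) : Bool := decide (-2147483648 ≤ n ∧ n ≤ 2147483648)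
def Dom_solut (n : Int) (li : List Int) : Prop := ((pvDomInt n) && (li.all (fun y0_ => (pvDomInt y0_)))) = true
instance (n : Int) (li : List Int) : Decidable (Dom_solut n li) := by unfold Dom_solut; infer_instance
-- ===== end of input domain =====

-- B replaces A's 7-start × 14-day rescan by one precomputed list of open-day
-- indices over three weeks and a single sliding-window pass over it.

-- ===== PORT A =====
-- inner 'for i in range(14): … break' of A, as structural recursion on the loop counter.
-- Lean's % on Int equals Python's % here because the divisor 7 is positive; li[day] is
-- pyGet? with a 0 default, exact on Pre_ (length ≥ 7 puts every index in range).
def solutInner (li : List Int) (n start : Int) (i : Nat) (cnt : Int) : Option Int :=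
  if _h : i < 14 then
    if ((PySem.List.pyGet? li ((start + (i : Int)) % 7)).getD 0) ≠ 0 then
      if cnt + 1 = n then some ((i : Int) + 1)
      else solutInner li n start (i + 1) (cnt + 1)
    else solutInner li n start (i + 1) cnt
  else none
  termination_by 14 - i

def solut (n : Int) (li : List Int) : Int :=
  let week_sum := li.sum
  if week_sum = 1 then (n - 1) * 7 + 1
  else
    let answer : Int := if n > week_sum then (PySem.Int.floordiv n week_sum - 1) * 7 else 0
    let n2 : Int := if n > week_sum then PySem.Int.mod n week_sum + week_sum else n
    let answer_rest : Int :=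
      (PySem.List.pyRange 0 7 1).foldl (fun ar start =>
        if ((PySem.List.pyGet? li start).getD 0) = 0 then ar
        else match solutInner li n2 start 0 0 with
          | some t => min ar t
          | none => ar) 14
    answer + answer_rest

-- ===== PORT B =====
def solut_alt (n : Int) (li : List Int) : Int :=
  let week_sum := li.sum
  if week_sum = 1 then (n - 1) * 7 + 1
  else
    let answer : Int := if n > week_sum then (PySem.Int.floordiv n week_sum - 1) * 7 else 0
    let n2 : Int := if n > week_sum then PySem.Int.mod n week_sum + week_sum else n
    let opens : List Int :=
      (PySem.List.pyRange 0 21 1).filter (fun i => decide (((PySem.List.pyGet? li (i % 7)).getD 0) ≠ 0))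
    let best : Int :=
      if 1 ≤ n2 then
        (opens.zip (PySem.List.slice opens (some (n2 - 1)) none)).foldl
          (fun b se => if se.1 < 7 ∧ se.2 - se.1 ≤ 13 then min b (se.2 - se.1 + 1) else b) 14
      else 14
    answer + best

-- ===== PRECONDITION & SPEC =====
-- Pre_ excludes exactly the inputs where A raises: lists shorter than 7 reaching the
-- scan (IndexError) and week_sum == 0 with n > 0 (ZeroDivisionError); B raises there too.
def Pre_solut (n : Int) (li : List Int) : Prop :=
  li.sum = 1 ∨ (7 ≤ li.length ∧ (li.sum = 0 → n ≤ 0))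
instance (n : Int) (li : List Int) : Decidable (Pre_solut n li) := by unfold Pre_solut; infer_instance

def pvWitness_solut : Int × List Int := (2, [1, 0, 1, 0, 0, 0, 0])

def Spec_solut (n : Int) (li : List Int) (out : Int) : Prop := out = solut_alt n li
instance (n : Int) (li : List Int) (out : Int) : Decidable (Spec_solut n li out) := by unfold Spec_solut; infer_instance

-- ===== CLAIM (what is proved, stated in full; the proofs are below) =====
def Claim_equal_solut : Prop := ∀ (n : Int) (li : List Int), Dom_solut n li → Pre_solut n li → Spec_solut n li (solut n li)

-- ===== LEMMAS AND PROOFS =====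

-- day j of the periodic schedule is open (abbrev so Decidable is inferred through it)
abbrev openP (li : List Int) (j : Int) : Prop := ((PySem.List.pyGet? li (j % 7)).getD 0) ≠ 0

-- open-day indices in [a, b)
def opensIn (li : List Int) (a b : Int) : List Int :=
  (PySem.List.pyRange a b 1).filter (fun j => decide (openP li j))

-- candidate window length for a start s, read off the 3-week opens list
def candAt (li : List Int) (k : Nat) (s : Int) : Option Int :=
  match (opensIn li s 21)[k]? with
  | some e => if s < 7 ∧ e - s ≤ 13 then some (e - s + 1) else none
  | none => none

-- the window-producing function of B's loop body
def fB : Int × Int → Option Int :=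
  fun se => if se.1 < 7 ∧ se.2 - se.1 ≤ 13 then some (se.2 - se.1 + 1) else none

lemma opensIn_split (li : List Int) (a c b : Int) (h1 : a ≤ c) (h2 : c ≤ b) :
    opensIn li a b = opensIn li a c ++ opensIn li c b := by
  unfold opensIn
  rw [PySem.List.pyRange_one_append a c b h1 h2, List.filter_append]

lemma opensIn_nil (li : List Int) (a b : Int) (h : b ≤ a) : opensIn li a b = [] := by
  unfold opensIn
  rw [PySem.List.pyRange_one_eq_nil h]
  rfl

lemma opensIn_peel (li : List Int) (a b : Int) (h : a < b) :
    opensIn li a b = if openP li a then a :: opensIn li (a + 1) b else opensIn li (a + 1) b := by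
  unfold opensIn
  rw [PySem.List.pyRange_one_cons h, List.filter_cons]
  by_cases ho : openP li a <;> simp [ho]

lemma mem_opensIn (li : List Int) (a b x : Int) (hx : x ∈ opensIn li a b) :
    a ≤ x ∧ x < b ∧ openP li x := by
  unfold opensIn at hx
  rcases List.mem_filter.mp hx with ⟨hr, hp⟩
  rcases (PySem.List.mem_pyRange_one).mp hr with ⟨h1, h2⟩
  exact ⟨h1, h2, of_decide_eq_true hp⟩

lemma inner_char (li : List Int) (n s : Int) :
    ∀ (fuel i : Nat) (cnt : Int), i + fuel = 14 →
      solutInner li n s i cnt =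
        (if 1 ≤ n - cnt then (opensIn li (s + (i : Int)) (s + 14))[(n - cnt - 1).toNat]? else none).map
          (fun e => e - s + 1) := by
  intro fuel
  induction fuel with
  | zero =>
    intro i cnt hi
    have h14 : i = 14 := by omega
    subst h14
    have h14' : opensIn li (s + ((14 : Nat) : Int)) (s + 14) = [] := by
      have hc : ((14 : Nat) : Int) = 14 := by norm_num
      rw [hc]
      exact opensIn_nil li _ _ (le_refl _)
    rw [solutInner, dif_neg (by omega : ¬ (14 < 14))]
    by_cases h : (1 : Int) ≤ n - cnt
    · rw [if_pos h, h14', List.getElem?_nil, Option.map_none]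
    · rw [if_neg h, Option.map_none]
  | succ fuel ih =>
    intro i cnt hi
    have hlt : i < 14 := by omega
    have hassoc : s + ((i : Int) + 1) = s + (i : Int) + 1 := by ring
    have hcast : ((i + 1 : Nat) : Int) = (i : Int) + 1 := by push_cast; ring
    have hpeel := opensIn_peel li (s + (i : Int)) (s + 14) (by omega)
    rw [solutInner]
    rw [dif_pos hlt]
    by_cases ho : openP li (s + (i : Int))
    · have ho' : ((PySem.List.pyGet? li ((s + (i : Int)) % 7)).getD 0) ≠ 0 := ho
      rw [if_pos ho']
      by_cases hc : cnt + 1 = n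
      · rw [if_pos hc, hpeel, if_pos ho, if_pos (by omega : (1 : Int) ≤ n - cnt)]
        have e0 : (n - cnt - 1).toNat = 0 := by omega
        rw [e0]
        simp only [List.getElem?_cons_zero, Option.map_some, Option.some.injEq]
        omega
      · rw [if_neg hc, ih (i + 1) (cnt + 1) (by omega), hcast, hassoc, hpeel, if_pos ho]
        by_cases h2 : (1 : Int) ≤ n - cnt
        · rw [if_pos h2, if_pos (by omega : (1 : Int) ≤ n - (cnt + 1))]
          have hsh : (n - cnt - 1).toNat = (n - (cnt + 1) - 1).toNat + 1 := by omega
          rw [hsh, List.getElem?_cons_succ]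
        · rw [if_neg h2, if_neg (by omega : ¬ (1 : Int) ≤ n - (cnt + 1))]
    · have ho' : ¬ ((PySem.List.pyGet? li ((s + (i : Int)) % 7)).getD 0) ≠ 0 := ho
      rw [if_neg ho', ih (i + 1) cnt (by omega), hcast, hassoc, hpeel, if_neg ho]

lemma cand_bridge (li : List Int) (k : Nat) (s : Int) (h0 : 0 ≤ s) (h7 : s < 7) :
    candAt li k s = ((opensIn li s (s + 14))[k]?).map (fun e => e - s + 1) := by
  have hsplit := opensIn_split li s (s + 14) 21 (by omega) (by omega)
  unfold candAt
  rw [hsplit]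
  by_cases hk : k < (opensIn li s (s + 14)).length
  · rw [List.getElem?_append_left hk]
    cases hL : (opensIn li s (s + 14))[k]? with
    | none =>
      rw [List.getElem?_eq_none_iff] at hL
      omega
    | some e =>
      have he := mem_opensIn li s (s + 14) e (List.mem_of_getElem? hL)
      simp only [Option.map_some]
      rw [if_pos ⟨h7, by omega⟩]
  · rw [List.getElem?_append_right (by omega)]
    rw [show (opensIn li s (s + 14))[k]? = none from List.getElem?_eq_none_iff.mpr (by omega),
      Option.map_none]
    cases hR : (opensIn li (s + 14) 21)[k - (opensIn li s (s + 14)).length]? with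
    | none => rfl
    | some e =>
      have he := mem_opensIn li (s + 14) 21 e (List.mem_of_getElem? hR)
      show (if s < 7 ∧ e - s ≤ 13 then some (e - s + 1) else none) = none
      rw [if_neg (by omega : ¬ (s < 7 ∧ e - s ≤ 13))]

lemma foldl_opt_min {α : Type} (l : List α) (f : α → Option Int) (a : Int) :
    l.foldl (fun ar x => match f x with | some t => min ar t | none => ar) a
      = List.foldl min a (l.filterMap f) := by
  induction l generalizing a with
  | nil => rfl
  | cons x t ih =>
    simp only [List.foldl_cons, List.filterMap_cons]
    cases f x <;> simp [ih]

lemma zip_drop_cons {α : Type} (x : α) (t : List α) (k : Nat) :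
    (x :: t).zip ((x :: t).drop k)
      = match (x :: t)[k]? with
        | some e => (x, e) :: t.zip (t.drop k)
        | none => [] := by
  by_cases hk : k < t.length + 1
  · rw [List.getElem?_eq_getElem (by simpa using hk)]
    rw [List.drop_eq_getElem_cons (by simpa using hk)]
    simp [List.zip_cons_cons, List.drop_succ_cons]
  · rw [List.getElem?_eq_none_iff.mpr (by simp; omega)]
    rw [List.drop_eq_nil_of_le (by simp; omega)]
    simp

lemma cands_core (li : List Int) (k : Nat) :
    ∀ (m : Nat) (a : Int), 21 - (m : Int) ≤ a → 0 ≤ a →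
      ((opensIn li a 21).zip ((opensIn li a 21).drop k)).filterMap fB
        = (opensIn li a 7).filterMap (candAt li k) := by
  intro m
  induction m with
  | zero =>
    intro a ha h0
    rw [opensIn_nil li a 21 (by omega), opensIn_nil li a 7 (by omega)]
    rfl
  | succ m ih =>
    intro a ha h0
    by_cases hlt : a < 21
    · have hpeel21 := opensIn_peel li a 21 hlt
      by_cases ho : openP li a
      · rw [hpeel21, if_pos ho, zip_drop_cons]
        cases hk : (a :: opensIn li (a + 1) 21)[k]? with
        | none =>
          rw [List.getElem?_eq_none_iff] at hk
          symm
          apply List.filterMap_eq_nil_iff.mpr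
          intro s hs
          have hms := mem_opensIn li a 7 s hs
          have hlen : (opensIn li s 21).length ≤ (opensIn li a 21).length := by
            rw [opensIn_split li a s 21 (by omega) (by omega)]
            simp
          rw [hpeel21, if_pos ho] at hlen
          simp only [List.length_cons] at hlen hk
          unfold candAt
          rw [List.getElem?_eq_none_iff.mpr (by omega)]
        | some e =>
          simp only [List.filterMap_cons]
          have hcand : candAt li k a = fB (a, e) := by
            unfold candAt
            rw [hpeel21, if_pos ho, hk]
            rfl
          have htail := ih (a + 1) (by omega) (by omega)
          by_cases ha7 : a < 7
          · rw [opensIn_peel li a 7 ha7, if_pos ho, List.filterMap_cons, hcand, htail]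
          · rw [opensIn_nil li a 7 (by omega)]
            have h7' : opensIn li (a + 1) 7 = [] := opensIn_nil li (a + 1) 7 (by omega)
            rw [h7'] at htail
            have hfB : fB (a, e) = none := by
              unfold fB
              rw [if_neg (by omega : ¬ ((a, e).1 < 7 ∧ (a, e).2 - (a, e).1 ≤ 13))]
            rw [hfB, htail]
      · rw [hpeel21, if_neg ho]
        have h7eq : opensIn li a 7 = opensIn li (a + 1) 7 := by
          by_cases ha7 : a < 7
          · rw [opensIn_peel li a 7 ha7, if_neg ho]
          · rw [opensIn_nil li a 7 (by omega), opensIn_nil li (a + 1) 7 (by omega)]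
        rw [h7eq]
        exact ih (a + 1) (by omega) (by omega)
    · rw [opensIn_nil li a 21 (by omega), opensIn_nil li a 7 (by omega)]
      rfl

lemma rest_eq (li : List Int) (n2 : Int) :
    (PySem.List.pyRange 0 7 1).foldl (fun ar start =>
        if ((PySem.List.pyGet? li start).getD 0) = 0 then ar
        else match solutInner li n2 start 0 0 with
          | some t => min ar t
          | none => ar) 14
    = (if 1 ≤ n2 then
        (((PySem.List.pyRange 0 21 1).filter (fun i => decide (((PySem.List.pyGet? li (i % 7)).getD 0) ≠ 0))).zip
            (PySem.List.slice ((PySem.List.pyRange 0 21 1).filter (fun i => decide (((PySem.List.pyGet? li (i % 7)).getD 0) ≠ 0))) (some (n2 - 1)) none)).foldl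
          (fun b se => if se.1 < 7 ∧ se.2 - se.1 ≤ 13 then min b (se.2 - se.1 + 1) else b) 14
      else 14) := by
  have hopens : ((PySem.List.pyRange 0 21 1).filter (fun i => decide (((PySem.List.pyGet? li (i % 7)).getD 0) ≠ 0)))
      = opensIn li 0 21 := rfl
  have hbodyA : (fun (ar start : Int) =>
        if ((PySem.List.pyGet? li start).getD 0) = 0 then ar
        else match solutInner li n2 start 0 0 with
          | some t => min ar t
          | none => ar)
      = (fun (ar x : Int) =>
          match (if ((PySem.List.pyGet? li x).getD 0) = 0 then none else solutInner li n2 x 0 0) with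
          | some t => min ar t
          | none => ar) := by
    funext ar x
    by_cases h : ((PySem.List.pyGet? li x).getD 0) = 0 <;> simp [h]
  rw [hbodyA, foldl_opt_min]
  by_cases hn : (1 : Int) ≤ n2
  · rw [if_pos hn, hopens]
    rw [PySem.List.slice_from (opensIn li 0 21) (by omega : (0 : Int) ≤ n2 - 1)]
    have hbodyB : (fun (b : Int) (se : Int × Int) =>
          if se.1 < 7 ∧ se.2 - se.1 ≤ 13 then min b (se.2 - se.1 + 1) else b)
        = (fun (b : Int) (se : Int × Int) =>
            match fB se with
            | some t => min b t
            | none => b) := by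
      funext b se
      unfold fB
      by_cases h : se.1 < 7 ∧ se.2 - se.1 ≤ 13
      · rw [if_pos h, if_pos h]
      · rw [if_neg h, if_neg h]
    rw [hbodyB, foldl_opt_min]
    rw [cands_core li (n2 - 1).toNat 21 0 (by norm_num) (by norm_num)]
    congr 1
    have h07 : opensIn li 0 7 = (PySem.List.pyRange 0 7 1).filter (fun j => decide (openP li j)) := rfl
    rw [h07, List.filterMap_filter]
    apply List.filterMap_congr
    intro s hs
    rcases (PySem.List.mem_pyRange_one).mp hs with ⟨hs0, hs7⟩
    have hmod : s % 7 = s := by omega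
    by_cases ho : openP li s
    · have hne : ¬ ((PySem.List.pyGet? li s).getD 0 = 0) := by
        unfold openP at ho
        rw [hmod] at ho
        exact ho
      rw [if_neg hne, if_pos (decide_eq_true ho)]
      rw [inner_char li n2 s 14 0 0 rfl]
      rw [cand_bridge li (n2 - 1).toNat s hs0 hs7]
      norm_num
      rw [if_pos hn]
    · have heq : ((PySem.List.pyGet? li s).getD 0) = 0 := by
        unfold openP at ho
        rw [hmod] at ho
        simpa using ho
      rw [if_pos heq, if_neg (by simp only [decide_eq_true_eq]; exact ho)]
  · rw [if_neg hn]
    have hnil : (PySem.List.pyRange 0 7 1).filterMap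
        (fun x => if ((PySem.List.pyGet? li x).getD 0) = 0 then none else solutInner li n2 x 0 0) = [] := by
      apply List.filterMap_eq_nil_iff.mpr
      intro s hs
      by_cases h : ((PySem.List.pyGet? li s).getD 0) = 0
      · rw [if_pos h]
      · rw [if_neg h, inner_char li n2 s 14 0 0 rfl]
        rw [if_neg (by omega : ¬ (1 : Int) ≤ n2 - 0)]
        rfl
    rw [hnil]
    rfl

-- ===== VERDICT (by name: the statement is the Claim_ definition above) =====
theorem solut_spec : Claim_equal_solut := by
  intro n li _hdom _hpre
  unfold Spec_solut solut solut_alt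
  by_cases h1 : li.sum = 1
  · simp [h1]
  · simp only [h1, if_false]
    rw [rest_eq]
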